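-- pv_equiv track=rewrite | github.com/cwverhey/adventofcode | 2024/day07.py | get_outcomes
-- ===== SOURCE A (Python) =====
-- def get_outcomes(n: list) -> list:
--     """
--     Get all possible outcomes for a list of numbers
--     """
--     outcomes = [
--         [ n[0]+n[1] , *n[2:] ],
--         [ n[0]*n[1] , *n[2:] ]
--     ]
--     if len(n) == 2:
--         return [ o[0] for o in outcomes ]
--     else:
--         return [ o2 for o1 in outcomes for o2 in get_outcomes(o1) ]
-- ===== SOURCE B (Python) =====
-- def get_outcomes(n: list) -> list:
--     """
--     Get all possible outcomes for a list of numbers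
--     """
--     results = [n[0] + n[1], n[0] * n[1]]
--     for x in n[2:]:
--         results = [out for r in results for out in (r + x, r * x)]
--     return results
-- ===== Notes on version B (the rewrite author's own statement) =====
-- stated objective: simpler
-- what changed: Replaced the binary recursion that rebuilds shortened lists with a single iterative left-fold that expands a flat results list, keeping the add-before-multiply depth-first order.
import Mathlib
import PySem

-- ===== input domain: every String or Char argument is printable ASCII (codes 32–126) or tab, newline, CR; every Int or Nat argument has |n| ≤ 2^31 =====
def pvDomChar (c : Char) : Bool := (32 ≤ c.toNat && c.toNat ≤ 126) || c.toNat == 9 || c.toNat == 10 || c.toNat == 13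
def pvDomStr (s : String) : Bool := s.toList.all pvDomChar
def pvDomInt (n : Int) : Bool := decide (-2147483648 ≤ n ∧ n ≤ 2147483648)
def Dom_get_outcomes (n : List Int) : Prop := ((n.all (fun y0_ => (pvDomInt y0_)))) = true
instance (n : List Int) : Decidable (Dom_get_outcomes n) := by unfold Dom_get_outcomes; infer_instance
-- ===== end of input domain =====

-- B replaces A's binary recursion on shortened lists by one iterative left-fold over the tail; same values, same depth-first order.

-- ===== PORT A =====
-- A recurses on the two lists [n0+n1, *rest] and [n0*n1, *rest]; each call drops one element.
def get_outcomes (n : List Int) : List Int :=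
  match n with
  | a :: b :: rest =>
      if rest.length + 2 = 2 then
        [a + b, a * b]
      else
        get_outcomes ((a + b) :: rest) ++ get_outcomes ((a * b) :: rest)
  | _ => []   -- Python raises IndexError here; excluded by Pre_get_outcomes
termination_by n.length
decreasing_by all_goals simp_all

-- ===== PORT B =====
def get_outcomes_alt (n : List Int) : List Int :=
  match n with
  | [] => []        -- Python raises IndexError here; excluded by Pre_get_outcomes
  | [_] => []       -- Python raises IndexError here; excluded by Pre_get_outcomes
  | a :: b :: rest =>
      rest.foldl (fun results x => results.flatMap (fun r => [r + x, r * x])) [a + b, a * b]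

-- ===== PRECONDITION & SPEC =====
-- A raises IndexError on lists of length < 2 (n[1] does not exist); B raises there too.
def Pre_get_outcomes (n : List Int) : Prop := 2 ≤ n.length
instance (n : List Int) : Decidable (Pre_get_outcomes n) := by unfold Pre_get_outcomes; infer_instance
def pvWitness_get_outcomes : List Int := [1, 2, 3]

def Spec_get_outcomes (n : List Int) (out : List Int) : Prop := out = get_outcomes_alt n
instance (n : List Int) (out : List Int) : Decidable (Spec_get_outcomes n out) := by unfold Spec_get_outcomes; infer_instance

-- ===== CLAIM (what is proved, stated in full; the proofs are below) =====
def Claim_equal_get_outcomes : Prop := ∀ (n : List Int), Dom_get_outcomes n → Pre_get_outcomes n → Spec_get_outcomes n (get_outcomes n)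

-- ===== LEMMAS AND PROOFS =====

theorem foldl_step_append (rs : List Int) (l1 l2 : List Int) :
    rs.foldl (fun results x => results.flatMap (fun r => [r + x, r * x])) (l1 ++ l2)
      = rs.foldl (fun results x => results.flatMap (fun r => [r + x, r * x])) l1
        ++ rs.foldl (fun results x => results.flatMap (fun r => [r + x, r * x])) l2 := by
  induction rs generalizing l1 l2 with
  | nil => simp
  | cons x rs ih =>
      simp only [List.foldl_cons, List.flatMap_append]
      exact ih _ _

theorem get_outcomes_key (rest : List Int) : ∀ (a b : Int),
    get_outcomes (a :: b :: rest)
      = rest.foldl (fun results x => results.flatMap (fun r => [r + x, r * x])) [a + b, a * b] := by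
  induction rest with
  | nil => intro a b; simp [get_outcomes]
  | cons x rs ih =>
      intro a b
      rw [get_outcomes]
      simp only [List.length_cons, if_neg (by omega : ¬ (rs.length + 1 + 2 = 2))]
      rw [ih (a + b) x, ih (a * b) x, List.foldl_cons]
      rw [show ([a + b, a * b].flatMap (fun r => [r + x, r * x]))
            = [(a + b) + x, (a + b) * x] ++ [(a * b) + x, (a * b) * x] by simp [List.flatMap]]
      exact (foldl_step_append rs _ _).symm

-- ===== VERDICT (by name: the statement is the Claim_ definition above) =====
theorem get_outcomes_spec : Claim_equal_get_outcomes := by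
  intro n _ hpre
  match n with
  | a :: b :: rest =>
      show get_outcomes (a :: b :: rest) = get_outcomes_alt (a :: b :: rest)
      rw [get_outcomes_key rest a b]; rfl
  | [] => exact absurd hpre (by simp [Pre_get_outcomes])
  | [a] => exact absurd hpre (by simp [Pre_get_outcomes])
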